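-- pv_equiv track=rewrite | github.com/ttricco/sarracen | sarracen/readers/read_phantom.py | _rename_duplicates
-- ===== SOURCE A (Python) =====
-- def _rename_duplicates(keys: list) -> list:
--     seen = dict()
--
--     for i, key in enumerate(keys):
--         if key not in seen:
--             seen[key] = 1
--         else:
--             seen[key] += 1
--             keys[i] += f'_{seen[key]}'
--
--     return keys
-- ===== SOURCE B (Python) =====
-- def _rename_duplicates(keys: list) -> list:
--     positions = {}
--     for i, key in enumerate(keys):
--         positions.setdefault(key, []).append(i)
--     for key, idxs in positions.items():
--         for r, pos in enumerate(idxs[1:]):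
--             keys[pos] = f'{key}_{r + 2}'
--     return keys
-- ===== Notes on version B (the rewrite author's own statement) =====
-- stated objective: alternative
-- what changed: Replaces A's single scan with a running per-key counter dict by two staged passes: first build an index table mapping each key to the list of positions where it occurs, then for each group rename the occurrences after the first in place with suffix _ (rank+1); equal because the rank of a position within its key's group equals A's running counter at that position.
import Mathlib
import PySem

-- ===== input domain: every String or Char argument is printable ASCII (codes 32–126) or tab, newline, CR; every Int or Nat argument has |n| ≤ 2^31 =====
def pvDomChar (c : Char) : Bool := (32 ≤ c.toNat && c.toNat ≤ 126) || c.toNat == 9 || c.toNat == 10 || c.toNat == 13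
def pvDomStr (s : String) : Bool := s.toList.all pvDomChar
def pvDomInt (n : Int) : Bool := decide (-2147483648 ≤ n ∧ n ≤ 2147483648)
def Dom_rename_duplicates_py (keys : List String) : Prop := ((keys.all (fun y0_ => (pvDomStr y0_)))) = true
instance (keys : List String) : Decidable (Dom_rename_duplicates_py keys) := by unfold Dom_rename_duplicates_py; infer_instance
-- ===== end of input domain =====

-- B replaces A's single running-counter scan by two staged passes: first build an index
-- table key -> list of occurrence positions, then rename each group's later occurrences
-- in place (alternative decomposition, same cost). Both A and B mutate the input list in
-- Python and return it; the equivalence proved here is about the return value.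


-- ===== PORT A =====
-- one iteration of A's loop body: state = (seen, keys); p = (i, key)
def renameStep (st : PySem.Dict String Int × List String) (p : Int × String) :
    PySem.Dict String Int × List String :=
  if st.1.contains p.2 = false then
    (st.1.insert p.2 1, st.2)
  else
    let n := st.1.getD p.2 0 + 1
    (st.1.insert p.2 n,
     PySem.List.pySetD st.2 p.1 (PySem.List.pyGetD st.2 p.1 "" ++ "_" ++ PySem.Int.toStr n))

def rename_duplicates_py (keys : List String) : List String :=
  ((PySem.List.enumerate keys 0).foldl renameStep (PySem.Dict.empty, keys)).2

-- ===== PORT B =====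
-- B's second pass over one group (key, idxs): for r, pos in enumerate(idxs[1:]): keys[pos] = f'{key}_{r+2}'
def renameGroupB (out : List String) (kv : String × List Int) : List String :=
  (PySem.List.enumerate (PySem.List.slice kv.2 (some 1) none) 0).foldl
    (fun acc rp => PySem.List.pySetD acc rp.2 (kv.1 ++ "_" ++ PySem.Int.toStr (rp.1 + 2))) out

-- first pass: positions.setdefault(key, []).append(i), i.e. d[key] = d.get(key, []) + [i]
def rename_duplicates_py_alt (keys : List String) : List String :=
  (((PySem.List.enumerate keys 0).foldl
      (fun d p => d.modify p.2 ([] : List Int) (fun v => v ++ [p.1])) PySem.Dict.empty).items).foldl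
    renameGroupB keys

-- ===== PRECONDITION & SPEC =====
def Spec_rename_duplicates_py (keys : List String) (out : List String) : Prop := out = rename_duplicates_py_alt keys
instance (keys : List String) (out : List String) : Decidable (Spec_rename_duplicates_py keys out) := by unfold Spec_rename_duplicates_py; infer_instance

-- ===== CLAIM (what is proved, stated in full; the proofs are below) =====
def Claim_equal_rename_duplicates_py : Prop := ∀ (keys : List String), Dom_rename_duplicates_py keys → Spec_rename_duplicates_py keys (rename_duplicates_py keys)

-- ===== LEMMAS AND PROOFS =====

-- common reference form: element i is keys[i] suffixed with the count of keys[i] in the prefix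
def specGo : List String → List String → List String
  | _, [] => []
  | pre, k :: rs =>
    (if pre.count k = 0 then k
     else k ++ "_" ++ PySem.Int.toStr ((pre.count k : Int) + 1)) :: specGo (pre ++ [k]) rs

lemma loopA (rest : List String) : ∀ (pre out : List String) (seen : PySem.Dict String Int),
    out.length = pre.length →
    (∀ k, seen.contains k = decide (pre.count k ≠ 0)) →
    (∀ k, seen.getD k 0 = (pre.count k : Int)) →
    ((PySem.List.enumerate rest (out.length : Int)).foldl renameStep (seen, out ++ rest)).2
      = out ++ specGo pre rest := by
  induction rest with
  | nil => intro pre out seen _ _ _; simp [PySem.List.enumerate_nil, specGo]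
  | cons k rs ih =>
    intro pre out seen hlen hc hg
    rw [PySem.List.enumerate_cons, List.foldl_cons]
    by_cases h : pre.count k = 0
    · have hcon : seen.contains k = false := by rw [hc k]; simp [h]
      have hstep : renameStep (seen, out ++ k :: rs) ((out.length : Int), k)
          = (seen.insert k 1, out ++ k :: rs) := by
        simp [renameStep, hcon]
      rw [hstep]
      have hsplit : out ++ k :: rs = (out ++ [k]) ++ rs := by simp
      have hlen' : ((out.length : Int) + 1) = (((out ++ [k]).length : Nat) : Int) := by
        simp
      rw [hsplit, hlen']
      rw [ih (pre ++ [k]) (out ++ [k]) (seen.insert k 1)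
        (by simp [hlen])
        (by
          intro k'
          by_cases hk : k' = k
          · subst hk; simp [List.count_append]
          · simp [PySem.Dict.contains_insert, hk, Ne.symm hk, hc k', List.count_append,
              beq_iff_eq])
        (by
          intro k'
          by_cases hk : k' = k
          · subst hk; simp [PySem.Dict.getD_insert_self, List.count_append, h]
          · simp [PySem.Dict.getD_insert_of_ne _ _ _ hk, hg k', List.count_append,
              Ne.symm hk])]
      simp [specGo, h]
    · have hcon : seen.contains k = true := by rw [hc k]; simp [h]
      have hget : PySem.List.pyGetD (out ++ k :: rs) ((out.length : Int)) "" = k := by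
        simp
      have hset : ∀ v, PySem.List.pySetD (out ++ k :: rs) ((out.length : Int)) v
          = (out ++ [v]) ++ rs := by
        intro v; simp
      have hstep : renameStep (seen, out ++ k :: rs) ((out.length : Int), k)
          = (seen.insert k ((pre.count k : Int) + 1),
             (out ++ [k ++ "_" ++ PySem.Int.toStr ((pre.count k : Int) + 1)]) ++ rs) := by
        simp only [renameStep, hcon]
        simp [hget, hset, hg k]
      rw [hstep]
      have hlen' : ((out.length : Int) + 1)
          = (((out ++ [k ++ "_" ++ PySem.Int.toStr ((pre.count k : Int) + 1)]).length : Nat) : Int) := by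
        simp
      rw [hlen']
      rw [ih (pre ++ [k]) _ _
        (by simp [hlen])
        (by
          intro k'
          by_cases hk : k' = k
          · subst hk; simp [List.count_append]
          · simp [PySem.Dict.contains_insert, hk, Ne.symm hk, hc k', List.count_append,
              beq_iff_eq])
        (by
          intro k'
          by_cases hk : k' = k
          · subst hk; simp [PySem.Dict.getD_insert_self, List.count_append]
          · simp [PySem.Dict.getD_insert_of_ne _ _ _ hk, hg k', List.count_append,
              Ne.symm hk])]
      simp [specGo, h]

-- ----- B side -----

-- the list of positions of k in keys, as A/B's dict builds it
def posOf (keys : List String) (k : String) : List Int :=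
  ((PySem.List.enumerate keys 0).filter (fun p => p.2 == k)).map (fun p => p.1)

lemma posOf_snoc (keys : List String) (x k : String) :
    posOf (keys ++ [x]) k = posOf keys k ++ (if x == k then [(keys.length : Int)] else []) := by
  by_cases h : x == k <;>
    simp [posOf, PySem.List.enumerate_append, PySem.List.enumerate_cons,
      PySem.List.enumerate_nil, List.filter_append, h]

lemma posOf_length (keys : List String) (k : String) :
    (posOf keys k).length = keys.count k := by
  induction keys using List.reverseRecOn with
  | nil => simp [posOf, PySem.List.enumerate_nil]
  | append_singleton ys x ih =>
    rw [posOf_snoc]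
    by_cases h : x == k <;> simp [h, List.count_append, ih] <;> simp_all [beq_iff_eq]

lemma posOf_get (keys : List String) (k : String) :
    ∀ (r : Nat) (q : Int), (posOf keys k)[r]? = some q →
      ∃ j : Nat, q = (j : Int) ∧ j < keys.length ∧ keys[j]? = some k ∧
        (keys.take j).count k = r := by
  induction keys using List.reverseRecOn with
  | nil => intro r q h; simp [posOf, PySem.List.enumerate_nil] at h
  | append_singleton ys x ih =>
    intro r q h
    rw [posOf_snoc] at h
    rcases lt_or_ge r (posOf ys k).length with hr | hr
    · rw [List.getElem?_append_left hr] at h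
      obtain ⟨j, hq, hj, hk, hcnt⟩ := ih r q h
      refine ⟨j, hq, by simp; omega, ?_, ?_⟩
      · rw [List.getElem?_append_left hj]; exact hk
      · rw [List.take_append_of_le_length (by omega)]; exact hcnt
    · by_cases hx : x == k
      · rw [if_pos hx, List.getElem?_append_right hr] at h
        have h0 : r - (posOf ys k).length = 0 := by
          rcases Nat.lt_or_ge (r - (posOf ys k).length) 1 with h1 | h1
          · omega
          · rw [List.getElem?_eq_none (by simpa using h1)] at h; cases h
        rw [h0] at h
        simp at h
        have hr' : r = (posOf ys k).length := by
          have : r - (posOf ys k).length < 1 := by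
            by_contra hcon
            rw [(by omega : r - (posOf ys k).length = 0)] at hcon; omega
          omega
        refine ⟨ys.length, by rw [← h], by simp, ?_, ?_⟩
        · rw [List.getElem?_append_right (le_refl _)]
          simpa using (eq_of_beq hx)
        · rw [List.take_append_of_le_length (le_refl _), List.take_length, hr',
            posOf_length]
      · rw [if_neg hx, List.append_nil] at h
        rw [List.getElem?_eq_none hr] at h; cases h

lemma count_take_lt (keys : List String) (k : String) (j : Nat) (hj : keys[j]? = some k) :
    (keys.take j).count k < (posOf keys k).length := by
  rw [posOf_length]
  have hjlen : j < keys.length := by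
    by_contra hcon
    rw [List.getElem?_eq_none (by omega)] at hj; cases hj
  have hmem : k ∈ keys.drop j := by
    have h0 : (keys.drop j)[0]? = some k := by
      rw [List.getElem?_drop]; simpa using hj
    exact List.mem_of_getElem? h0
  have hsplit : keys.count k = (keys.take j).count k + (keys.drop j).count k := by
    conv_lhs => rw [← List.take_append_drop j keys]
    rw [List.count_append]
  have : 0 < (keys.drop j).count k := List.count_pos_iff.mpr hmem
  omega

lemma count_take_mono (keys : List String) (k : String) {j j' : Nat} (h : j < j')
    (hjk : keys[j]? = some k) :
    (keys.take j).count k < (keys.take j').count k := by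
  have h1 : (keys.take (j + 1)).count k = (keys.take j).count k + 1 := by
    rw [List.take_add_one, hjk]
    simp [List.count_append]
  have hsub : (keys.take (j + 1)).Sublist (keys.take j') := by
    have : keys.take (j + 1) = (keys.take j').take (j + 1) := by
      rw [List.take_take, min_eq_left (by omega)]
    rw [this]
    exact List.take_sublist _ _
  have := hsub.count_le k
  omega

lemma count_take_inj (keys : List String) (k : String) {j j' : Nat}
    (h1 : keys[j]? = some k) (h2 : keys[j']? = some k)
    (he : (keys.take j).count k = (keys.take j').count k) : j = j' := by
  rcases lt_trichotomy j j' with h | h | h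
  · have := count_take_mono keys k h h1; omega
  · exact h
  · have := count_take_mono keys k h h2; omega

lemma setFold_length (l : List (Int × Int)) (f : Int × Int → String) :
    ∀ acc : List String,
      (l.foldl (fun acc rp => PySem.List.pySetD acc rp.2 (f rp)) acc).length = acc.length := by
  induction l with
  | nil => intro acc; rfl
  | cons p t ih =>
    intro acc
    rw [List.foldl_cons, ih]
    exact PySem.List.length_pySetD acc p.2 (f p)

lemma innerFold (keys : List String) (k : String) :
    ∀ (t : List Int) (r0 : Nat) (acc : List String),
      t = (posOf keys k).drop (r0 + 1) → acc.length = keys.length →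
      ∀ (j : Nat), j < keys.length →
      ((PySem.List.enumerate t (r0 : Int)).foldl
          (fun acc rp => PySem.List.pySetD acc rp.2 (k ++ "_" ++ PySem.Int.toStr (rp.1 + 2))) acc)[j]? =
        if keys[j]? = some k ∧ r0 + 1 ≤ (keys.take j).count k
        then some (k ++ "_" ++ PySem.Int.toStr (((keys.take j).count k : Int) + 1))
        else acc[j]? := by
  intro t
  induction t with
  | nil =>
    intro r0 acc ht hlen j hj
    rw [PySem.List.enumerate_nil, List.foldl_nil, if_neg]
    rintro ⟨hk, hc⟩
    have h1 := count_take_lt keys k j hk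
    have h2 : (posOf keys k).length ≤ r0 + 1 := by
      have := congrArg List.length ht
      simp [List.length_drop] at this
      omega
    omega
  | cons p t' ih =>
    intro r0 acc ht hlen j hj
    have hp : (posOf keys k)[r0 + 1]? = some p := by
      have h0 : ((posOf keys k).drop (r0 + 1))[0]? = some p := by rw [← ht]; rfl
      rw [List.getElem?_drop] at h0
      simpa using h0
    obtain ⟨j₀, hq, hj₀, hkj₀, hcj₀⟩ := posOf_get keys k (r0 + 1) p hp
    have ht' : t' = (posOf keys k).drop (r0 + 1 + 1) := by
      have hd : (posOf keys k).drop (r0 + 1 + 1) = ((posOf keys k).drop (r0 + 1)).drop 1 := by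
        rw [List.drop_drop]
      rw [hd, ← ht]
      rfl
    rw [PySem.List.enumerate_cons, List.foldl_cons]
    have hcast : ((r0 : Int) + 1) = (((r0 + 1 : Nat)) : Int) := by push_cast; ring
    rw [hcast, ih (r0 + 1)
      (PySem.List.pySetD acc p (k ++ "_" ++ PySem.Int.toStr ((r0 : Int) + 2)))
      ht' (by rw [PySem.List.length_pySetD]; exact hlen) j hj]
    have hset : PySem.List.pySetD acc p (k ++ "_" ++ PySem.Int.toStr ((r0 : Int) + 2))
        = acc.set j₀ (k ++ "_" ++ PySem.Int.toStr ((r0 : Int) + 2)) := by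
      rw [hq, PySem.List.pySetD_natCast]
    by_cases hk : keys[j]? = some k
    · by_cases hc2 : r0 + 1 + 1 ≤ (keys.take j).count k
      · rw [if_pos ⟨hk, hc2⟩, if_pos ⟨hk, by omega⟩]
      · rw [if_neg (by rintro ⟨_, h⟩; exact hc2 h)]
        by_cases hc1 : r0 + 1 ≤ (keys.take j).count k
        · have hce : (keys.take j).count k = r0 + 1 := by omega
          have hjj : j = j₀ := count_take_inj keys k hk hkj₀ (by rw [hce, hcj₀])
          subst hjj
          rw [if_pos ⟨hk, hc1⟩, hset, List.getElem?_set, if_pos rfl,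
            if_pos (by omega : j < acc.length), hce]
          have hv : (((r0 + 1 : Nat)) : Int) + 1 = (r0 : Int) + 2 := by push_cast; ring
          rw [hv]
        · rw [if_neg (by rintro ⟨_, h⟩; exact hc1 h)]
          have hne : j₀ ≠ j := by
            rintro rfl
            exact hc1 (le_of_eq hcj₀.symm)
          rw [hset, List.getElem?_set, if_neg hne]
    · have hne : j₀ ≠ j := by rintro rfl; exact hk hkj₀
      rw [if_neg (by rintro ⟨h, _⟩; exact hk h), if_neg (by rintro ⟨h, _⟩; exact hk h),
        hset, List.getElem?_set, if_neg hne]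

lemma renameGroupB_length (out : List String) (kv : String × List Int) :
    (renameGroupB out kv).length = out.length := by
  rw [renameGroupB]
  exact setFold_length _ (fun rp => kv.1 ++ "_" ++ PySem.Int.toStr (rp.1 + 2)) out

lemma outerLen (gs : List (String × List Int)) :
    ∀ acc : List String, (gs.foldl renameGroupB acc).length = acc.length := by
  induction gs with
  | nil => intro acc; rfl
  | cons g t ih =>
    intro acc
    rw [List.foldl_cons, ih, renameGroupB_length]

lemma outerFold (keys : List String) :
    ∀ (ks : List String) (acc : List String), acc.length = keys.length →
      ∀ (j : Nat) (hj : j < keys.length),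
      ((ks.map (fun k => (k, posOf keys k))).foldl renameGroupB acc)[j]? =
        if keys[j] ∈ ks ∧ 1 ≤ (keys.take j).count keys[j]
        then some (keys[j] ++ "_" ++ PySem.Int.toStr (((keys.take j).count keys[j] : Int) + 1))
        else acc[j]? := by
  intro ks
  induction ks with
  | nil =>
    intro acc hlen j hj
    rw [List.map_nil, List.foldl_nil, if_neg (by rintro ⟨h, _⟩; simp at h)]
  | cons k t ih =>
    intro acc hlen j hj
    rw [List.map_cons, List.foldl_cons]
    have hgrp : renameGroupB acc (k, posOf keys k)
        = (PySem.List.enumerate ((posOf keys k).drop (0 + 1)) ((0 : Nat) : Int)).foldl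
            (fun acc rp => PySem.List.pySetD acc rp.2 (k ++ "_" ++ PySem.Int.toStr (rp.1 + 2))) acc := by
      rw [renameGroupB, PySem.List.slice_from_one]
      simp [List.drop_one]
    have hj? : keys[j]? = some keys[j] := List.getElem?_eq_getElem hj
    rw [hgrp]
    have hlen1 : ((PySem.List.enumerate ((posOf keys k).drop (0 + 1)) ((0 : Nat) : Int)).foldl
        (fun acc rp => PySem.List.pySetD acc rp.2 (k ++ "_" ++ PySem.Int.toStr (rp.1 + 2))) acc).length
        = keys.length := by
      rw [setFold_length _ (fun rp => k ++ "_" ++ PySem.Int.toStr (rp.1 + 2)) acc]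
      exact hlen
    rw [ih _ hlen1 j hj,
      innerFold keys k ((posOf keys k).drop (0 + 1)) 0 acc rfl hlen j hj]
    by_cases hc : 1 ≤ (keys.take j).count keys[j]
    · by_cases hmt : keys[j] ∈ t
      · rw [if_pos ⟨hmt, hc⟩, if_pos ⟨List.mem_cons_of_mem _ hmt, hc⟩]
      · rw [if_neg (by rintro ⟨h, _⟩; exact hmt h)]
        by_cases hkk : keys[j] = k
        · rw [if_pos ⟨by rw [hj?, hkk], by rwa [← hkk]⟩,
            if_pos ⟨by rw [hkk]; exact List.mem_cons_self, hc⟩, hkk]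
        · rw [if_neg (by rintro ⟨h, _⟩; exact hkk (Option.some_injective _ (hj? ▸ h).symm).symm),
            if_neg (by rintro ⟨h, _⟩; rcases List.mem_cons.mp h with h | h; exact hkk h; exact hmt h)]
    · rw [if_neg (by rintro ⟨_, h⟩; exact hc h),
        if_neg (by
          rintro ⟨h, hcc⟩
          have hkk : keys[j] = k := by rw [hj?] at h; exact Option.some.inj h
          rw [← hkk] at hcc
          exact hc hcc),
        if_neg (by rintro ⟨_, h⟩; exact hc h)]

lemma dictB_items (keys : List String) :
    ((PySem.List.enumerate keys 0).foldl
        (fun d p => d.modify p.2 ([] : List Int) (fun v => v ++ [p.1])) PySem.Dict.empty).items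
      = (PySem.Set.ofList keys).map (fun k => (k, posOf keys k)) := by
  have hkeys : ((PySem.List.enumerate keys 0).foldl
      (fun d p => d.modify p.2 ([] : List Int) (fun v => v ++ [p.1])) PySem.Dict.empty).keys
      = PySem.Set.ofList keys := by
    rw [PySem.Dict.keys_foldl_modify_key (PySem.List.enumerate keys 0) (fun p => p.2)
      ([] : List Int) (fun _ p v => v ++ [p.1]) PySem.Dict.empty]
    rw [PySem.List.map_snd_enumerate]
    rfl
  have hnodup := PySem.Dict.nodup_keys_foldl_modify_key (PySem.List.enumerate keys 0)
    (fun p => p.2) ([] : List Int) (fun _ p v => v ++ [p.1]) PySem.Dict.empty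
    (by simp [PySem.Dict.keys_empty])
  have hgetD : ∀ c, ((PySem.List.enumerate keys 0).foldl
      (fun d p => d.modify p.2 ([] : List Int) (fun v => v ++ [p.1])) PySem.Dict.empty).getD c []
      = posOf keys c := by
    intro c
    have h1 : (PySem.List.enumerate keys 0).foldl
        (fun d p => d.modify p.2 ([] : List Int) (fun v => v ++ [p.1])) PySem.Dict.empty
        = ((PySem.List.enumerate keys 0).map Prod.swap).foldl
            (fun d q => d.modify q.1 ([] : List Int) (fun v => v ++ [q.2])) PySem.Dict.empty := by
      rw [List.foldl_map]
      apply PySem.List.foldl_congr_mem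
      intro acc p _
      cases p
      rfl
    rw [h1, PySem.Dict.getD_foldl_modify_append]
    simp [posOf, List.filter_map, List.map_map, Function.comp_def]
  rw [PySem.Dict.items_eq_map_keys _ hnodup ([] : List Int), hkeys]
  exact List.map_congr_left (fun k _ => by rw [hgetD k])

lemma specGo_length : ∀ (rest pre : List String), (specGo pre rest).length = rest.length := by
  intro rest
  induction rest with
  | nil => intro pre; rfl
  | cons x rs ih => intro pre; simp [specGo, ih]

lemma specGo_getElem? : ∀ (rest pre : List String) (j : Nat) (hj : j < rest.length),
    (specGo pre rest)[j]? = some (if (pre ++ rest.take j).count (rest[j]'hj) = 0 then rest[j]'hj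
      else rest[j]'hj ++ "_" ++ PySem.Int.toStr (((pre ++ rest.take j).count (rest[j]'hj) : Int) + 1)) := by
  intro rest
  induction rest with
  | nil => intro pre j hj; simp at hj
  | cons x rs ih =>
    intro pre j hj
    cases j with
    | zero => simp [specGo]
    | succ j =>
      have hj' : j < rs.length := by simpa using hj
      rw [specGo]
      rw [List.getElem?_cons_succ, ih (pre ++ [x]) j hj']
      simp [List.append_assoc]

-- ===== VERDICT (by name: the statement is the Claim_ definition above) =====
theorem rename_duplicates_py_spec : Claim_equal_rename_duplicates_py := by
  intro keys _
  show rename_duplicates_py keys = rename_duplicates_py_alt keys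
  have hA : rename_duplicates_py keys = specGo [] keys := by
    have := loopA keys [] [] PySem.Dict.empty (by simp)
      (by intro k; simp) (by intro k; simp)
    simpa [rename_duplicates_py] using this
  have hB : rename_duplicates_py_alt keys = specGo [] keys := by
    rw [rename_duplicates_py_alt, dictB_items]
    apply List.ext_getElem?
    intro i
    by_cases hi : i < keys.length
    · rw [outerFold keys (PySem.Set.ofList keys) keys rfl i hi,
        specGo_getElem? keys [] i hi]
      have hmem : keys[i] ∈ PySem.Set.ofList keys :=
        (PySem.Set.mem_ofList _ _).mpr (List.getElem_mem hi)
      by_cases hc : 1 ≤ (keys.take i).count keys[i]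
      · rw [if_pos ⟨hmem, hc⟩, if_neg (by simp; omega)]
        simp
      · rw [if_neg (by rintro ⟨_, h⟩; exact hc h),
          if_pos (by simp; omega)]
        exact List.getElem?_eq_getElem hi
    · rw [List.getElem?_eq_none (by rw [outerLen]; omega),
        List.getElem?_eq_none (by rw [specGo_length]; omega)]
  rw [hA, hB]
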